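-- pv_equiv track=rewrite | github.com/LeeSureman/machine_learning__by_numpy | decision_tree/CART.py | divide_by_a_name
-- ===== SOURCE A (Python) =====
-- def divide_by_a_name(data,a_index):
--     value2examples = dict()
--
--     for i, example in enumerate(data):
--         if value2examples.get(example[a_index]) is None:
--             value2examples[example[a_index]] = [example]
--         else:
--             value2examples[example[a_index]].append(example)
--
--     return value2examples
-- ===== SOURCE B (Python) =====
-- def divide_by_a_name(data, a_index):
--     keys = list(dict.fromkeys(example[a_index] for example in data))
--     return {v: [e for e in data if e[a_index] == v] for v in keys}
-- ===== Notes on version B (the rewrite author's own statement) =====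
-- stated objective: alternative
-- what changed: Replaces the single incremental get-then-insert/append grouping pass over a mutable dict by collecting the distinct feature values in first-appearance order and then building each group with one filter scan of the data per distinct value.
import Mathlib
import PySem

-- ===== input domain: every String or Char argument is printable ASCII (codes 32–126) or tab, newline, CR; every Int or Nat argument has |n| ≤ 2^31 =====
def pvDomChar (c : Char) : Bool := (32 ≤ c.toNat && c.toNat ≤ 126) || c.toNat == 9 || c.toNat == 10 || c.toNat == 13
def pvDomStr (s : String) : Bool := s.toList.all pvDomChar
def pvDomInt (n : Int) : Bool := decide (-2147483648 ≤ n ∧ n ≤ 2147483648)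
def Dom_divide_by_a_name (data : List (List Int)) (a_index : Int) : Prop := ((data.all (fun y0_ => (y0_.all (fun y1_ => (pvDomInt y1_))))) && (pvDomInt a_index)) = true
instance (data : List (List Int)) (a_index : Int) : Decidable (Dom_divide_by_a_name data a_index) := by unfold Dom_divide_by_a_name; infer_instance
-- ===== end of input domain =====

-- B builds the same grouping by collecting the distinct feature values first and then filtering the data
-- once per distinct value, instead of A's single incremental dict-grouping pass (objective: alternative).


-- ===== PORT A =====
-- literal port of A: enumerate(data), dict get-is-None test, insert [example] or append in place
def divide_by_a_name (data : List (List Int)) (a_index : Int) : List (Int × List (List Int)) :=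
  ((PySem.List.enumerate data 0).foldl
    (fun (d : PySem.Dict Int (List (List Int))) p =>
      match d.get? (PySem.List.pyGetD p.2 a_index 0) with
      | none => d.insert (PySem.List.pyGetD p.2 a_index 0) [p.2]
      | some l => d.insert (PySem.List.pyGetD p.2 a_index 0) (l ++ [p.2]))
    PySem.Dict.empty).items

-- ===== PORT B =====
-- literal port of B: keys = list(dict.fromkeys(e[a_index] for e in data)); {v: [e for e in data if e[a_index] == v] for v in keys}
def divide_by_a_name_alt (data : List (List Int)) (a_index : Int) : List (Int × List (List Int)) :=
  let keys := PySem.List.dedup (data.map (fun e => PySem.List.pyGetD e a_index 0))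
  keys.map (fun v => (v, data.filter (fun e => PySem.List.pyGetD e a_index 0 == v)))

-- ===== PRECONDITION & SPEC =====
-- Pre_ excludes exactly the inputs where some row makes row[a_index] raise IndexError in A (and in B).
def Pre_divide_by_a_name (data : List (List Int)) (a_index : Int) : Prop :=
  ∀ row ∈ data, PySem.Raise.InRange row.length a_index
instance (data : List (List Int)) (a_index : Int) : Decidable (Pre_divide_by_a_name data a_index) := by unfold Pre_divide_by_a_name; infer_instance

def pvWitness_divide_by_a_name : List (List Int) × Int := ([[1, 2], [3, 2], [4, 5]], 1)

def Spec_divide_by_a_name (data : List (List Int)) (a_index : Int) (out : List (Int × List (List Int))) : Prop := out = divide_by_a_name_alt data a_index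
instance (data : List (List Int)) (a_index : Int) (out : List (Int × List (List Int))) : Decidable (Spec_divide_by_a_name data a_index out) := by unfold Spec_divide_by_a_name; infer_instance

-- ===== CLAIM (what is proved, stated in full; the proofs are below) =====
def Claim_equal_divide_by_a_name : Prop := ∀ (data : List (List Int)) (a_index : Int), Dom_divide_by_a_name data a_index → Pre_divide_by_a_name data a_index → Spec_divide_by_a_name data a_index (divide_by_a_name data a_index)

-- ===== LEMMAS AND PROOFS =====

-- the items B produces, as a function of the processed prefix (B's own shape)
def pvGrp (a_index : Int) (xs : List (List Int)) : List (Int × List (List Int)) :=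
  (PySem.List.dedup (xs.map (fun e => PySem.List.pyGetD e a_index 0))).map
    (fun v => (v, xs.filter (fun e => PySem.List.pyGetD e a_index 0 == v)))

theorem pv_dict_ext {κ ν : Type} (d d' : PySem.Dict κ ν) (h : d.items = d'.items) : d = d' := by
  have h1 : PySem.Dict.mk d.items = d := rfl
  have h2 : PySem.Dict.mk d'.items = d' := rfl
  rw [← h1, ← h2, h]

-- folding over enumerate while ignoring the counter is folding over the list
theorem pv_foldl_enumerate {α β : Type} (f : β → α → β) (xs : List α) (s : Int) (init : β) :
    (PySem.List.enumerate xs s).foldl (fun d p => f d p.2) init = xs.foldl f init := by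
  induction xs generalizing s init with
  | nil => simp [PySem.List.enumerate_nil]
  | cons x xs ih => simp [PySem.List.enumerate_cons, ih]

theorem pv_dedup_append_singleton {α : Type} [BEq α] [LawfulBEq α] (l : List α) (k : α) :
    PySem.List.dedup (l ++ [k]) =
      if k ∈ l then PySem.List.dedup l else PySem.List.dedup l ++ [k] := by
  have h : PySem.List.dedup (l ++ [k]) = PySem.Set.add (PySem.List.dedup l) k := by
    simp [PySem.List.dedup, PySem.Set.ofList, List.foldl_append]
  rw [h]
  by_cases hk : k ∈ l
  · have hc : (PySem.List.dedup l).contains k = true := by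
      simpa [PySem.List.mem_dedup] using hk
    simp [PySem.Set.add, hk]
  · have hc : (PySem.List.dedup l).contains k = false := by
      simpa [PySem.List.mem_dedup] using hk
    simp [PySem.Set.add, hk]

theorem pv_keys_grp (a_index : Int) (xs : List (List Int)) :
    (PySem.Dict.mk (pvGrp a_index xs)).keys
      = PySem.List.dedup (xs.map (fun e => PySem.List.pyGetD e a_index 0)) := by
  simp [pvGrp, PySem.Dict.keys_mk, List.map_map, Function.comp_def]

theorem pv_get?_grp (a_index : Int) (xs : List (List Int)) (k : Int) :
    (PySem.Dict.mk (pvGrp a_index xs)).get? k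
      = if k ∈ xs.map (fun e => PySem.List.pyGetD e a_index 0)
        then some (xs.filter (fun e => PySem.List.pyGetD e a_index 0 == k))
        else none := by
  by_cases hk : k ∈ xs.map (fun e => PySem.List.pyGetD e a_index 0)
  · rw [if_pos hk]
    rw [(PySem.Dict.get?_eq_some_iff_mem_items _ _ _ (by
      rw [pv_keys_grp]; exact PySem.List.nodup_dedup _))]
    simp only [pvGrp]
    exact List.mem_map.mpr ⟨k, (PySem.List.mem_dedup _ _).mpr hk, rfl⟩
  · rw [if_neg hk]
    rw [PySem.Dict.get?_eq_none_iff_not_mem_keys, pv_keys_grp]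
    simpa [PySem.List.mem_dedup] using hk

theorem pv_contains_grp (a_index : Int) (xs : List (List Int)) (k : Int) :
    (PySem.Dict.mk (pvGrp a_index xs)).contains k
      = decide (k ∈ xs.map (fun e => PySem.List.pyGetD e a_index 0)) := by
  rw [PySem.Dict.contains_eq_decide_mem_keys, pv_keys_grp]
  simp

-- one step of A's loop preserves the B-shaped invariant
theorem pv_step_grp (a_index : Int) (pref : List (List Int)) (x : List Int) :
    (match (PySem.Dict.mk (pvGrp a_index pref)).get? (PySem.List.pyGetD x a_index 0) with
      | none => (PySem.Dict.mk (pvGrp a_index pref)).insert (PySem.List.pyGetD x a_index 0) [x]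
      | some l => (PySem.Dict.mk (pvGrp a_index pref)).insert (PySem.List.pyGetD x a_index 0) (l ++ [x]))
      = PySem.Dict.mk (pvGrp a_index (pref ++ [x])) := by
  by_cases hk : PySem.List.pyGetD x a_index 0 ∈ pref.map (fun e => PySem.List.pyGetD e a_index 0)
  · -- existing key: lookup succeeds, value replaced in place
    rw [pv_get?_grp, if_pos hk]
    show (PySem.Dict.mk (pvGrp a_index pref)).insert (PySem.List.pyGetD x a_index 0)
        ((pref.filter (fun e => PySem.List.pyGetD e a_index 0 == PySem.List.pyGetD x a_index 0)) ++ [x])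
      = PySem.Dict.mk (pvGrp a_index (pref ++ [x]))
    apply pv_dict_ext
    have hc : (PySem.Dict.mk (pvGrp a_index pref)).contains (PySem.List.pyGetD x a_index 0) = true := by
      rw [pv_contains_grp]; simpa using hk
    rw [PySem.Dict.items_insert_of_contains _ _ hc]
    simp only [pvGrp, List.map_map, List.map_append, List.map_cons, List.map_nil]
    rw [pv_dedup_append_singleton, if_pos hk]
    apply List.map_congr_left
    intro v hv
    by_cases hvk : v = PySem.List.pyGetD x a_index 0
    · subst hvk; simp [List.filter_append]
    · simp [List.filter_append, hvk, Ne.symm hvk]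
  · -- new key: lookup fails, (key, [x]) is appended at the end
    rw [pv_get?_grp, if_neg hk]
    show (PySem.Dict.mk (pvGrp a_index pref)).insert (PySem.List.pyGetD x a_index 0) [x]
      = PySem.Dict.mk (pvGrp a_index (pref ++ [x]))
    apply pv_dict_ext
    have hc : (PySem.Dict.mk (pvGrp a_index pref)).contains (PySem.List.pyGetD x a_index 0) = false := by
      rw [pv_contains_grp]; simpa using hk
    rw [PySem.Dict.items_insert_of_not_contains _ _ hc]
    simp only [pvGrp, List.map_append, List.map_cons, List.map_nil]
    rw [pv_dedup_append_singleton, if_neg hk, List.map_append]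
    have hnil : pref.filter (fun e => PySem.List.pyGetD e a_index 0 == PySem.List.pyGetD x a_index 0) = [] := by
      rw [List.filter_eq_nil_iff]
      intro a ha
      simp only [beq_iff_eq]
      intro h
      exact hk (List.mem_map.mpr ⟨a, ha, h⟩)
    congr 1
    · apply List.map_congr_left
      intro v hv
      have hne : v ≠ PySem.List.pyGetD x a_index 0 := by
        rintro rfl
        exact hk ((PySem.List.mem_dedup _ _).mp hv)
      simp [List.filter_append, Ne.symm hne]
    · simp [List.filter_append, hnil]

-- A's loop, started on the B-shape of a prefix, ends in the B-shape of the whole list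
theorem pv_foldl_grp (a_index : Int) (rest : List (List Int)) : ∀ pref : List (List Int),
    rest.foldl
      (fun (d : PySem.Dict Int (List (List Int))) x =>
        match d.get? (PySem.List.pyGetD x a_index 0) with
        | none => d.insert (PySem.List.pyGetD x a_index 0) [x]
        | some l => d.insert (PySem.List.pyGetD x a_index 0) (l ++ [x]))
      (PySem.Dict.mk (pvGrp a_index pref))
      = PySem.Dict.mk (pvGrp a_index (pref ++ rest)) := by
  induction rest with
  | nil => intro pref; simp
  | cons x rest ih =>
      intro pref
      simp only [List.foldl_cons]
      rw [pv_step_grp a_index pref x, ih (pref ++ [x]), List.append_assoc]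
      rfl

-- ===== VERDICT (by name: the statement is the Claim_ definition above) =====
theorem divide_by_a_name_spec : Claim_equal_divide_by_a_name := by
  intro data a_index _ _
  unfold Spec_divide_by_a_name divide_by_a_name
  rw [pv_foldl_enumerate
    (fun (d : PySem.Dict Int (List (List Int))) x =>
      match d.get? (PySem.List.pyGetD x a_index 0) with
      | none => d.insert (PySem.List.pyGetD x a_index 0) [x]
      | some l => d.insert (PySem.List.pyGetD x a_index 0) (l ++ [x]))
    data 0 PySem.Dict.empty]
  have h0 : (PySem.Dict.empty : PySem.Dict Int (List (List Int))) = PySem.Dict.mk (pvGrp a_index []) := rfl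
  rw [h0, pv_foldl_grp a_index data []]
  show pvGrp a_index data = divide_by_a_name_alt data a_index
  rfl
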